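-- pv_equiv track=rewrite | github.com/R4INYIS/web-intelligence-scraper | scripts/main.py | is_valid_social_link
-- ===== SOURCE A (Python) =====
-- def is_valid_social_link(url, platform):
--     """Validate social media link for given platform."""
--     url_lower = url.lower()
--     exclude = ['sharer', 'share', 'intent/tweet', 'share.php']
--     if any(p in url_lower for p in exclude): return False
--
--     if platform == 'facebook': return 'facebook.com/' in url_lower and len(url) > 20
--     elif platform == 'instagram': return 'instagram.com/' in url_lower and len(url) > 20
--     elif platform == 'linkedin': return 'linkedin.com/' in url_lower and len(url) > 20
--     elif platform == 'twitter': return ('twitter.com/' in url_lower or 'x.com/' in url_lower)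
--     return True
-- ===== SOURCE B (Python) =====
-- # B: hand-written recursive substring scanner instead of `in`, blacklist collapsed
-- # to ['share', 'intent/tweet'] (since 'sharer' and 'share.php' both contain 'share'),
-- # and the required domain built as platform + '.com/'.
--
-- def _occurs(token, s):
--     """token occurs as a substring of s (explicit scan over start positions)."""
--     i = 0
--     while len(token) + i <= len(s):
--         if s.startswith(token, i):
--             return True
--         i += 1
--     return False
--
-- def is_valid_social_link(url, platform):
--     s = url.lower()
--     if _occurs('share', s) or _occurs('intent/tweet', s):
--         return False
--     if platform in ('facebook', 'instagram', 'linkedin'):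
--         return len(url) > 20 and _occurs(platform + '.com/', s)
--     if platform == 'twitter':
--         return _occurs('twitter.com/', s) or _occurs('x.com/', s)
--     return True
-- ===== Notes on version B (the rewrite author's own statement) =====
-- stated objective: alternative
-- what changed: Replaces the four-token blacklist by the two-token ['share','intent/tweet'] via substring absorption ('sharer' and 'share.php' both contain 'share'), implements substring search as a hand-written recursive scanner instead of Python's 'in', and builds the required domain as platform + '.com/' instead of an if/elif chain of literals.
import Mathlib
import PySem

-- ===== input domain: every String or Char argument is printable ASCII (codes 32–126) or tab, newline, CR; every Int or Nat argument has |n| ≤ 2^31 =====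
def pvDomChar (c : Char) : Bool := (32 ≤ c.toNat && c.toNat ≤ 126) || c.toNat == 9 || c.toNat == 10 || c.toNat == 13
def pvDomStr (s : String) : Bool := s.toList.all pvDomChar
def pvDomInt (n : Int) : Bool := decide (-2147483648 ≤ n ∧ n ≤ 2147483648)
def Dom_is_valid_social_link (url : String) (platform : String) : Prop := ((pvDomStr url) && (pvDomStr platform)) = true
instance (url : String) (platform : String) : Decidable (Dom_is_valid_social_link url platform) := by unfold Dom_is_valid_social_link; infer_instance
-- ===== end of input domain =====

-- B replaces Python's `in` by a hand-written recursive substring scanner, collapses the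
-- four-token blacklist to ['share','intent/tweet'] by substring absorption, and builds the
-- required domain as platform + '.com/' (objective: alternative); same return values.

-- ===== PORT A =====
def is_valid_social_link (url : String) (platform : String) : Bool :=
  let url_lower := PySem.Str.lower url
  let exclude := ["sharer", "share", "intent/tweet", "share.php"]
  if exclude.any (fun p => PySem.Str.isIn p url_lower) then false
  else if platform == "facebook" then PySem.Str.isIn "facebook.com/" url_lower && decide (PySem.Str.len url > 20)
  else if platform == "instagram" then PySem.Str.isIn "instagram.com/" url_lower && decide (PySem.Str.len url > 20)
  else if platform == "linkedin" then PySem.Str.isIn "linkedin.com/" url_lower && decide (PySem.Str.len url > 20)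
  else if platform == "twitter" then PySem.Str.isIn "twitter.com/" url_lower || PySem.Str.isIn "x.com/" url_lower
  else true

-- ===== PORT B =====
-- _occurs: the while loop over start positions, as structural recursion on the unscanned
-- suffix (i += 1 = drop one char; s.startswith(token, i) = isPrefixOf on that suffix)
def pvOccurs (t : List Char) (s : List Char) : Bool :=
  if t.length > s.length then false
  else
    t.isPrefixOf s ||
      match s with
      | [] => false            -- unreachable: t = [] is a prefix of []
      | _ :: rest => pvOccurs t rest

def is_valid_social_link_alt (url : String) (platform : String) : Bool :=
  let s := (PySem.Str.lower url).toList
  if pvOccurs "share".toList s || pvOccurs "intent/tweet".toList s then false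
  else if platform == "facebook" || platform == "instagram" || platform == "linkedin" then
    decide (PySem.Str.len url > 20) && pvOccurs (platform ++ ".com/").toList s
  else if platform == "twitter" then
    pvOccurs "twitter.com/".toList s || pvOccurs "x.com/".toList s
  else true

-- ===== PRECONDITION & SPEC =====
def Spec_is_valid_social_link (url : String) (platform : String) (out : Bool) : Prop := out = is_valid_social_link_alt url platform
instance (url : String) (platform : String) (out : Bool) : Decidable (Spec_is_valid_social_link url platform out) := by unfold Spec_is_valid_social_link; infer_instance

-- ===== CLAIM (what is proved, stated in full; the proofs are below) =====
def Claim_equal_is_valid_social_link : Prop := ∀ (url : String) (platform : String), Dom_is_valid_social_link url platform → Spec_is_valid_social_link url platform (is_valid_social_link url platform)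

-- ===== LEMMAS AND PROOFS =====

-- the scanner decides list infix
theorem pvOccurs_iff (t s : List Char) : pvOccurs t s = true ↔ t <:+: s := by
  induction s with
  | nil =>
    unfold pvOccurs
    rcases t with _ | ⟨c, t'⟩ <;> simp
  | cons c rest ih =>
    unfold pvOccurs
    by_cases hlen : t.length > (c :: rest).length
    · rw [if_pos hlen]
      simp only [Bool.false_eq_true, false_iff]
      intro h
      have := h.length_le
      omega
    · rw [if_neg hlen]
      simp [List.infix_cons_iff, ih, List.IsPrefix]

-- the scanner on lowered url equals Python's `sub in url_lower`
theorem pvOccurs_eq_isIn (t : String) (u : String) :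
    pvOccurs t.toList (PySem.Str.lower u).toList = PySem.Str.isIn t (PySem.Str.lower u) := by
  by_cases h : t.toList <:+: (PySem.Str.lower u).toList
  · rw [(pvOccurs_iff _ _).mpr h, (PySem.Str.isIn_iff_infix _ _).mpr h]
  · have h1 : pvOccurs t.toList (PySem.Str.lower u).toList = false := by
      rw [Bool.eq_false_iff]; intro hc; exact h ((pvOccurs_iff _ _).mp hc)
    have h2 : PySem.Str.isIn t (PySem.Str.lower u) = false := by
      rw [Bool.eq_false_iff]; intro hc; exact h ((PySem.Str.isIn_iff_infix _ _).mp hc)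
    rw [h1, h2]

-- absorption: A's four-token blacklist fires iff B's two-token one does
theorem pv_exclude_eq (ul : String) :
    (["sharer", "share", "intent/tweet", "share.php"].any (fun p => PySem.Str.isIn p ul))
      = (PySem.Str.isIn "share" ul || PySem.Str.isIn "intent/tweet" ul) := by
  simp only [List.any_cons, List.any_nil, Bool.or_false]
  cases hs : PySem.Str.isIn "share" ul with
  | true => simp only [Bool.true_or, Bool.or_true]
  | false =>
    cases hi : PySem.Str.isIn "intent/tweet" ul with
    | true => simp only [Bool.true_or, Bool.or_true]
    | false =>
      have hsr : PySem.Str.isIn "sharer" ul = false := by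
        cases hsr' : PySem.Str.isIn "sharer" ul with
        | false => rfl
        | true =>
          have : PySem.Str.isIn "share" ul = true :=
            (PySem.Str.isIn_iff_infix _ _).mpr
              (List.IsInfix.trans (by decide : ("share".toList <:+: "sharer".toList))
                ((PySem.Str.isIn_iff_infix _ _).mp hsr'))
          rw [this] at hs; cases hs
      have hsp : PySem.Str.isIn "share.php" ul = false := by
        cases hsp' : PySem.Str.isIn "share.php" ul with
        | false => rfl
        | true =>
          have : PySem.Str.isIn "share" ul = true :=
            (PySem.Str.isIn_iff_infix _ _).mpr
              (List.IsInfix.trans (by decide : ("share".toList <:+: "share.php".toList))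
                ((PySem.Str.isIn_iff_infix _ _).mp hsp'))
          rw [this] at hs; cases hs
      rw [hsr, hsp]; rfl

-- ===== VERDICT (by name: the statement is the Claim_ definition above) =====
theorem is_valid_social_link_spec : Claim_equal_is_valid_social_link := by
  intro url platform _
  unfold Spec_is_valid_social_link is_valid_social_link is_valid_social_link_alt
  simp only [pvOccurs_eq_isIn, pv_exclude_eq]
  by_cases hex : (PySem.Str.isIn "share" (PySem.Str.lower url)
      || PySem.Str.isIn "intent/tweet" (PySem.Str.lower url)) = true
  · rw [if_pos hex, if_pos hex]
  · rw [if_neg hex, if_neg hex]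
    by_cases hf : platform = "facebook"
    · subst hf
      rw [show ("facebook" ++ ".com/" : String) = "facebook.com/" from rfl]
      simp [Bool.and_comm]
    · by_cases hi : platform = "instagram"
      · subst hi
        rw [show ("instagram" ++ ".com/" : String) = "instagram.com/" from rfl]
        simp [Bool.and_comm]
      · by_cases hl : platform = "linkedin"
        · subst hl
          rw [show ("linkedin" ++ ".com/" : String) = "linkedin.com/" from rfl]
          simp [Bool.and_comm]
        · by_cases ht : platform = "twitter"
          · subst ht; simp
          · simp [hf, hi, hl, ht]
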